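-- pv_equiv track=rewrite | github.com/womri1998/ProjectEuler400s | problem463.py | unevens
-- ===== SOURCE A (Python) =====
-- def evens(n):
--     if n < 2:
--         return 0
--     elif n < 4:
--         return 1
--     elif n == 4:
--         return 2
--     else:
--         return both(n // 2)
--
-- def unevens(n):
--     if n < 3:
--         return 1
--     elif n < 5:
--         return 4
--     else:
--         off = n % 4 == 1 or n % 4 == 2
--         if off:
--             off = exact(n - (n % 4 - 1)) + 3 * ((n - 3) // 4 == 0)
--         return 5 * (unevens((n - 3) // 4 * 2 + 1) - 1) - 3 * both((n - 3) // 4) + off + 4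
--
-- def both(n):
--     return evens(n) + unevens(n)
--
-- def exact(n):
--     if n == 1:
--         return 1
--     elif n == 3:
--         return 3
--     elif n % 2 == 0:
--         return exact(n // 2)
--     elif n % 4 == 1:
--         return 2 * exact((n - 1) // 2 + 1) - exact((n - 1) // 4)
--     else:
--         return 3 * exact((n - 3) // 2 + 1) - 2 * exact((n - 3) // 4)
-- ===== SOURCE B (Python) =====
-- def unevens(n):
--     # Same values as A, but each of the mutually-recursive helpers is memoized
--     # in a dict, so repeated subproblems are computed once (polylog(n) calls).
--     if n < 3:
--         return 1
--     ex = {}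
--     ev = {}
--     un = {}
--
--     def exact(k):
--         r = ex.get(k)
--         if r is None:
--             if k == 1:
--                 r = 1
--             elif k == 3:
--                 r = 3
--             elif k % 2 == 0:
--                 r = exact(k // 2)
--             elif k % 4 == 1:
--                 r = 2 * exact((k - 1) // 2 + 1) - exact((k - 1) // 4)
--             else:
--                 r = 3 * exact((k - 3) // 2 + 1) - 2 * exact((k - 3) // 4)
--             ex[k] = r
--         return r
--
--     def evens(k):
--         r = ev.get(k)
--         if r is None:
--             if k < 2:
--                 r = 0
--             elif k < 4:
--                 r = 1
--             elif k == 4: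
--                 r = 2
--             else:
--                 r = both(k // 2)
--             ev[k] = r
--         return r
--
--     def un_(k):
--         r = un.get(k)
--         if r is None:
--             if k < 3:
--                 r = 1
--             elif k < 5:
--                 r = 4
--             else:
--                 u = un_((k - 3) // 4 * 2 + 1)
--                 b = both((k - 3) // 4)
--                 if k % 4 == 1 or k % 4 == 2:
--                     off = exact(k - (k % 4 - 1)) + 3 * ((k - 3) // 4 == 0)
--                 else:
--                     off = 0
--                 r = 5 * (u - 1) - 3 * b + off + 4
--             un[k] = r
--         return r
--
--     def both(k):
--         return evens(k) + un_(k)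
--
--     return un_(n)
-- ===== Notes on version B (the rewrite author's own statement) =====
-- stated objective: faster
-- what changed: The four mutually-recursive helpers (exact/evens/unevens/both) are memoized in dicts, so each distinct subproblem is computed once instead of exponentially many repeated recursive calls.
import Mathlib
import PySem

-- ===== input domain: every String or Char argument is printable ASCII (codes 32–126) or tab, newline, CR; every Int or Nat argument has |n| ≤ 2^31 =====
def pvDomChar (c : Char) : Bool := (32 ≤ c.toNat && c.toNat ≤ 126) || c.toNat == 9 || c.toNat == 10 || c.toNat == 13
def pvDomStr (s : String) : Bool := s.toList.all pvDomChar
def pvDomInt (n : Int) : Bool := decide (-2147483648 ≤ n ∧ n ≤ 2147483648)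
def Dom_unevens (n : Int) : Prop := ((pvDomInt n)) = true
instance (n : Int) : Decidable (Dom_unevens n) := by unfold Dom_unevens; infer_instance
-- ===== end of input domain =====

-- B memoizes the mutually-recursive helpers in dicts so each distinct subproblem is
-- computed once (measured asymptotically faster); A recomputes them exponentially often.
-- Both ports index the recursion by Nat (for n ≥ 3 every Python intermediate is a
-- nonnegative int, where Python's // and % coincide with Nat division/mod); for n < 3
-- both Pythons return 1 from their first branch.  The Nat 'fuel' argument only makes the
-- recursions total (the wrappers pass enough fuel: the recursion depth is < 2·n + 4, as
-- the fuel-irrelevance lemmas below prove); it changes no computed value.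

-- ===== PORT A =====
def exactA : Nat → Nat → Int
  | 0, _ => 0
  | fuel + 1, n =>
    if n = 1 then 1
    else if n = 3 then 3
    else if n % 2 = 0 then exactA fuel (n / 2)
    else if n % 4 = 1 then 2 * exactA fuel ((n - 1) / 2 + 1) - exactA fuel ((n - 1) / 4)
    else 3 * exactA fuel ((n - 3) / 2 + 1) - 2 * exactA fuel ((n - 3) / 4)

mutual
def evensA : Nat → Nat → Int
  | 0, _ => 0
  | fuel + 1, n =>
    if n < 2 then 0
    else if n < 4 then 1
    else if n = 4 then 2
    else bothA fuel (n / 2)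

def unevensA : Nat → Nat → Int
  | 0, _ => 0
  | fuel + 1, n =>
    if n < 3 then 1
    else if n < 5 then 4
    else
      let off : Int :=
        if n % 4 = 1 ∨ n % 4 = 2 then
          exactA fuel (n - (n % 4 - 1)) + 3 * (if (n - 3) / 4 = 0 then 1 else 0)
        else 0
      5 * (unevensA fuel ((n - 3) / 4 * 2 + 1) - 1) - 3 * bothA fuel ((n - 3) / 4) + off + 4

def bothA : Nat → Nat → Int
  | 0, _ => 0
  | fuel + 1, n => evensA fuel n + unevensA fuel n
end

def unevens (n : Int) : Int :=
  if n < 3 then 1 else unevensA (2 * n.toNat + 4) n.toNat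

-- ===== PORT B =====
-- the three memo dicts of Source B (ex/ev/un), threaded through the computation as explicit state
structure Memo3 where
  ex : PySem.Dict Nat Int
  ev : PySem.Dict Nat Int
  un : PySem.Dict Nat Int

def exactM : Nat → Nat → PySem.Dict Nat Int → Int × PySem.Dict Nat Int
  | 0, _, d => (0, d)
  | fuel + 1, n, d =>
    match d.get? n with
    | some v => (v, d)
    | none =>
      let p : Int × PySem.Dict Nat Int :=
        if n = 1 then (1, d)
        else if n = 3 then (3, d)
        else if n % 2 = 0 then exactM fuel (n / 2) d
        else if n % 4 = 1 then
          let q := exactM fuel ((n - 1) / 2 + 1) d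
          let q' := exactM fuel ((n - 1) / 4) q.2
          (2 * q.1 - q'.1, q'.2)
        else
          let q := exactM fuel ((n - 3) / 2 + 1) d
          let q' := exactM fuel ((n - 3) / 4) q.2
          (3 * q.1 - 2 * q'.1, q'.2)
      (p.1, p.2.insert n p.1)

mutual
def evensM : Nat → Nat → Memo3 → Int × Memo3
  | 0, _, m => (0, m)
  | fuel + 1, n, m =>
    match m.ev.get? n with
    | some v => (v, m)
    | none =>
      let p : Int × Memo3 :=
        if n < 2 then (0, m)
        else if n < 4 then (1, m)
        else if n = 4 then (2, m)
        else bothM fuel (n / 2) m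
      (p.1, { p.2 with ev := p.2.ev.insert n p.1 })

def unevensM : Nat → Nat → Memo3 → Int × Memo3
  | 0, _, m => (0, m)
  | fuel + 1, n, m =>
    match m.un.get? n with
    | some v => (v, m)
    | none =>
      let p : Int × Memo3 :=
        if n < 3 then (1, m)
        else if n < 5 then (4, m)
        else
          let u := unevensM fuel ((n - 3) / 4 * 2 + 1) m
          let b := bothM fuel ((n - 3) / 4) u.2
          let om : Int × Memo3 :=
            if n % 4 = 1 ∨ n % 4 = 2 then
              let e := exactM fuel (n - (n % 4 - 1)) b.2.ex
              (e.1 + 3 * (if (n - 3) / 4 = 0 then 1 else 0), { b.2 with ex := e.2 })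
            else (0, b.2)
          (5 * (u.1 - 1) - 3 * b.1 + om.1 + 4, om.2)
      (p.1, { p.2 with un := p.2.un.insert n p.1 })

def bothM : Nat → Nat → Memo3 → Int × Memo3
  | 0, _, m => (0, m)
  | fuel + 1, n, m =>
    let e := evensM fuel n m
    let u := unevensM fuel n e.2
    (e.1 + u.1, u.2)
end

def unevens_alt (n : Int) : Int :=
  if n < 3 then 1
  else (unevensM (2 * n.toNat + 4) n.toNat ⟨PySem.Dict.empty, PySem.Dict.empty, PySem.Dict.empty⟩).1

-- ===== PRECONDITION & SPEC =====
def Spec_unevens (n : Int) (out : Int) : Prop := out = unevens_alt n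
instance (n : Int) (out : Int) : Decidable (Spec_unevens n out) := by unfold Spec_unevens; infer_instance

-- ===== CLAIM (what is proved, stated in full; the proofs are below) =====
def Claim_equal_unevens : Prop := ∀ (n : Int), Dom_unevens n → Spec_unevens n (unevens n)

-- ===== LEMMAS AND PROOFS =====

theorem exactA_zero : ∀ f, exactA f 0 = 0 := by
  intro f; induction f with
  | zero => rfl
  | succ f ih => simp [exactA, ih]

-- enough fuel: the value of exactA does not depend on the fuel once fuel ≥ n + 1
theorem exactA_fuel (n : Nat) : ∀ f g, n + 1 ≤ f → n + 1 ≤ g → exactA f n = exactA g n := by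
  induction n using Nat.strong_induction_on with
  | _ n ih =>
    intro f g hf hg
    obtain ⟨f', rfl⟩ : ∃ f', f = f' + 1 := ⟨f - 1, by omega⟩
    obtain ⟨g', rfl⟩ : ∃ g', g = g' + 1 := ⟨g - 1, by omega⟩
    rw [exactA, exactA]
    split_ifs with h1 h2 h3 h4
    · rfl
    · rfl
    · by_cases h0 : n = 0
      · subst h0; rw [exactA_zero, exactA_zero]
      · exact ih (n / 2) (by omega) f' g' (by omega) (by omega)
    · rw [ih ((n - 1) / 2 + 1) (by omega) f' g' (by omega) (by omega),
        ih ((n - 1) / 4) (by omega) f' g' (by omega) (by omega)]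
    · rw [ih ((n - 3) / 2 + 1) (by omega) f' g' (by omega) (by omega),
        ih ((n - 3) / 4) (by omega) f' g' (by omega) (by omega)]

-- enough fuel for the mutual trio: 2n+4 for evens/unevens, 2n+5 for both
theorem trioA_fuel (n : Nat) :
    (∀ f g, 2 * n + 4 ≤ f → 2 * n + 4 ≤ g → evensA f n = evensA g n) ∧
    (∀ f g, 2 * n + 4 ≤ f → 2 * n + 4 ≤ g → unevensA f n = unevensA g n) ∧
    (∀ f g, 2 * n + 5 ≤ f → 2 * n + 5 ≤ g → bothA f n = bothA g n) := by
  induction n using Nat.strong_induction_on with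
  | _ n ih =>
    have hev : ∀ f g, 2 * n + 4 ≤ f → 2 * n + 4 ≤ g → evensA f n = evensA g n := by
      intro f g hf hg
      obtain ⟨f', rfl⟩ : ∃ f', f = f' + 1 := ⟨f - 1, by omega⟩
      obtain ⟨g', rfl⟩ : ∃ g', g = g' + 1 := ⟨g - 1, by omega⟩
      rw [evensA, evensA]
      split_ifs with h1 h2 h3
      · rfl
      · rfl
      · rfl
      · exact (ih (n / 2) (by omega)).2.2 f' g' (by omega) (by omega)
    have hun : ∀ f g, 2 * n + 4 ≤ f → 2 * n + 4 ≤ g → unevensA f n = unevensA g n := by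
      intro f g hf hg
      obtain ⟨f', rfl⟩ : ∃ f', f = f' + 1 := ⟨f - 1, by omega⟩
      obtain ⟨g', rfl⟩ : ∃ g', g = g' + 1 := ⟨g - 1, by omega⟩
      rw [unevensA, unevensA]
      split_ifs with h1 h2 h3 h4
      · rfl
      · rfl
      all_goals
        rw [(ih ((n - 3) / 4 * 2 + 1) (by omega)).2.1 f' g' (by omega) (by omega),
          (ih ((n - 3) / 4) (by omega)).2.2 f' g' (by omega) (by omega)]
      all_goals try rw [exactA_fuel (n - (n % 4 - 1)) f' g' (by omega) (by omega)]
    refine ⟨hev, hun, ?_⟩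
    intro f g hf hg
    obtain ⟨f', rfl⟩ : ∃ f', f = f' + 1 := ⟨f - 1, by omega⟩
    obtain ⟨g', rfl⟩ : ∃ g', g = g' + 1 := ⟨g - 1, by omega⟩
    rw [bothA, bothA, hev f' g' (by omega) (by omega), hun f' g' (by omega) (by omega)]

-- a memo table is sound when every stored entry equals the (A-side, canonical-fuel) value
def SoundE (d : PySem.Dict Nat Int) : Prop :=
  ∀ k v, d.get? k = some v → v = exactA (k + 1) k

def SoundM (m : Memo3) : Prop :=
  SoundE m.ex ∧ (∀ k v, m.ev.get? k = some v → v = evensA (2 * k + 4) k) ∧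
    (∀ k v, m.un.get? k = some v → v = unevensA (2 * k + 4) k)

theorem exactM_zero : ∀ f d, SoundE d → (exactM f 0 d).1 = 0 ∧ SoundE (exactM f 0 d).2 := by
  intro f
  induction f with
  | zero => exact fun d hd => ⟨rfl, hd⟩
  | succ f ih =>
    intro d hd
    rw [exactM]
    split
    next v hg => exact ⟨by simpa [exactA_zero] using hd 0 v hg, hd⟩
    next hg =>
      simp only []
      obtain ⟨e, s⟩ := ih d hd
      refine ⟨by simpa using e, ?_⟩
      intro k v hv
      rw [PySem.Dict.get?_insert] at hv
      split at hv
      next hk => cases hv; rw [hk]; simpa [exactA_zero] using e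
      next hk => exact s k v hv

theorem exactM_sound (n : Nat) : ∀ f, n + 1 ≤ f → ∀ d, SoundE d →
    (exactM f n d).1 = exactA (n + 1) n ∧ SoundE (exactM f n d).2 := by
  induction n using Nat.strong_induction_on with
  | _ n ih =>
    intro f hf d hd
    by_cases h0 : n = 0
    · subst h0
      obtain ⟨e, s⟩ := exactM_zero f d hd
      exact ⟨by rw [e, exactA_zero], s⟩
    obtain ⟨f', rfl⟩ : ∃ f', f = f' + 1 := ⟨f - 1, by omega⟩
    rw [exactM]
    split
    next v hg =>
      exact ⟨hd n v hg, hd⟩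
    next hg =>
      have hcore : ∀ (p : Int × PySem.Dict Nat Int), p.1 = exactA (n + 1) n → SoundE p.2 →
          ((p.1, p.2.insert n p.1)).1 = exactA (n + 1) n ∧ SoundE ((p.1, p.2.insert n p.1)).2 := by
        intro p he hs
        refine ⟨he, ?_⟩
        intro k v hv
        rw [PySem.Dict.get?_insert] at hv
        split at hv
        next hk => cases hv; rw [hk, ← he]
        next hk => exact hs k v hv
      apply hcore
      · rw [exactA]
        split_ifs with h1 h2 h3 h4
        · rfl
        · rfl
        · rw [(ih (n / 2) (by omega) f' (by omega) d hd).1,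
            exactA_fuel (n / 2) (n / 2 + 1) n (by omega) (by omega)]
        · obtain ⟨e1, s1⟩ := ih ((n - 1) / 2 + 1) (by omega) f' (by omega) d hd
          obtain ⟨e2, s2⟩ := ih ((n - 1) / 4) (by omega) f' (by omega) _ s1
          simp only [e1, e2]
          rw [exactA_fuel ((n - 1) / 2 + 1) ((n - 1) / 2 + 1 + 1) n (by omega) (by omega),
            exactA_fuel ((n - 1) / 4) ((n - 1) / 4 + 1) n (by omega) (by omega)]
        · obtain ⟨e1, s1⟩ := ih ((n - 3) / 2 + 1) (by omega) f' (by omega) d hd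
          obtain ⟨e2, s2⟩ := ih ((n - 3) / 4) (by omega) f' (by omega) _ s1
          simp only [e1, e2]
          rw [exactA_fuel ((n - 3) / 2 + 1) ((n - 3) / 2 + 1 + 1) n (by omega) (by omega),
            exactA_fuel ((n - 3) / 4) ((n - 3) / 4 + 1) n (by omega) (by omega)]
      · split_ifs with h1 h2 h3 h4
        · exact hd
        · exact hd
        · exact (ih (n / 2) (by omega) f' (by omega) d hd).2
        · exact (ih ((n - 1) / 4) (by omega) f' (by omega) _
            (ih ((n - 1) / 2 + 1) (by omega) f' (by omega) d hd).2).2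
        · exact (ih ((n - 3) / 4) (by omega) f' (by omega) _
            (ih ((n - 3) / 2 + 1) (by omega) f' (by omega) d hd).2).2

theorem trioM_sound (n : Nat) :
    (∀ f, 2 * n + 4 ≤ f → ∀ m, SoundM m →
      (evensM f n m).1 = evensA (2 * n + 4) n ∧ SoundM (evensM f n m).2) ∧
    (∀ f, 2 * n + 4 ≤ f → ∀ m, SoundM m →
      (unevensM f n m).1 = unevensA (2 * n + 4) n ∧ SoundM (unevensM f n m).2) ∧
    (∀ f, 2 * n + 5 ≤ f → ∀ m, SoundM m →
      (bothM f n m).1 = bothA (2 * n + 5) n ∧ SoundM (bothM f n m).2) := by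
  induction n using Nat.strong_induction_on with
  | _ n ih =>
    have hev : ∀ f, 2 * n + 4 ≤ f → ∀ m, SoundM m →
        (evensM f n m).1 = evensA (2 * n + 4) n ∧ SoundM (evensM f n m).2 := by
      intro f hf m hm
      obtain ⟨f', rfl⟩ : ∃ f', f = f' + 1 := ⟨f - 1, by omega⟩
      rw [evensM]
      split
      next v hg => exact ⟨hm.2.1 n v hg, hm⟩
      next hg =>
        have hcore : ∀ (p : Int × Memo3), p.1 = evensA (2 * n + 4) n → SoundM p.2 →
            ((p.1, { p.2 with ev := p.2.ev.insert n p.1 })).1 = evensA (2 * n + 4) n ∧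
              SoundM ((p.1, { p.2 with ev := p.2.ev.insert n p.1 })).2 := by
          intro p he hs
          refine ⟨he, hs.1, ?_, hs.2.2⟩
          intro k v hv
          rw [PySem.Dict.get?_insert] at hv
          split at hv
          next hk => cases hv; rw [hk, ← he]
          next hk => exact hs.2.1 k v hv
        apply hcore
        · rw [show 2 * n + 4 = (2 * n + 3) + 1 by omega, evensA]
          split_ifs with h1 h2 h3
          · rfl
          · rfl
          · rfl
          · rw [((ih (n / 2) (by omega)).2.2 f' (by omega) m hm).1]
            exact ((trioA_fuel (n / 2)).2.2 (2 * (n / 2) + 5) (2 * n + 3)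
              (by omega) (by omega))
        · split_ifs with h1 h2 h3
          · exact hm
          · exact hm
          · exact hm
          · exact ((ih (n / 2) (by omega)).2.2 f' (by omega) m hm).2
    have hun : ∀ f, 2 * n + 4 ≤ f → ∀ m, SoundM m →
        (unevensM f n m).1 = unevensA (2 * n + 4) n ∧ SoundM (unevensM f n m).2 := by
      intro f hf m hm
      obtain ⟨f', rfl⟩ : ∃ f', f = f' + 1 := ⟨f - 1, by omega⟩
      rw [unevensM]
      split
      next v hg => exact ⟨hm.2.2 n v hg, hm⟩
      next hg =>
        have hcore : ∀ (p : Int × Memo3), p.1 = unevensA (2 * n + 4) n → SoundM p.2 →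
            ((p.1, { p.2 with un := p.2.un.insert n p.1 })).1 = unevensA (2 * n + 4) n ∧
              SoundM ((p.1, { p.2 with un := p.2.un.insert n p.1 })).2 := by
          intro p he hs
          refine ⟨he, hs.1, hs.2.1, ?_⟩
          intro k v hv
          rw [PySem.Dict.get?_insert] at hv
          split at hv
          next hk => cases hv; rw [hk, ← he]
          next hk => exact hs.2.2 k v hv
        apply hcore
        · rw [show 2 * n + 4 = (2 * n + 3) + 1 by omega, unevensA]
          split_ifs with h1 h2 h3 h4
          · rfl
          · rfl
          all_goals
            obtain ⟨eu, su⟩ := (ih ((n - 3) / 4 * 2 + 1) (by omega)).2.1 f' (by omega) m hm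
            obtain ⟨eb, sb⟩ := (ih ((n - 3) / 4) (by omega)).2.2 f' (by omega) _ su
            have hu' : unevensA (2 * ((n - 3) / 4 * 2 + 1) + 4) ((n - 3) / 4 * 2 + 1) =
                unevensA (2 * n + 3) ((n - 3) / 4 * 2 + 1) :=
              (trioA_fuel _).2.1 _ _ (by omega) (by omega)
            have hb' : bothA (2 * ((n - 3) / 4) + 5) ((n - 3) / 4) =
                bothA (2 * n + 3) ((n - 3) / 4) :=
              (trioA_fuel _).2.2 _ _ (by omega) (by omega)
          · obtain ⟨ee, se⟩ := exactM_sound (n - (n % 4 - 1)) f' (by omega) _ sb.1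
            have he' : exactA (n - (n % 4 - 1) + 1) (n - (n % 4 - 1)) =
                exactA (2 * n + 3) (n - (n % 4 - 1)) :=
              exactA_fuel _ _ _ (by omega) (by omega)
            simp only [eu, eb, ee, hu', hb', he']
          · obtain ⟨ee, se⟩ := exactM_sound (n - (n % 4 - 1)) f' (by omega) _ sb.1
            have he' : exactA (n - (n % 4 - 1) + 1) (n - (n % 4 - 1)) =
                exactA (2 * n + 3) (n - (n % 4 - 1)) :=
              exactA_fuel _ _ _ (by omega) (by omega)
            simp only [eu, eb, ee, hu', hb', he']
          · simp only [eu, eb, hu', hb']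
        · split_ifs with h1 h2 h3 h4
          · exact hm
          · exact hm
          all_goals
            obtain ⟨eu, su⟩ := (ih ((n - 3) / 4 * 2 + 1) (by omega)).2.1 f' (by omega) m hm
            obtain ⟨eb, sb⟩ := (ih ((n - 3) / 4) (by omega)).2.2 f' (by omega) _ su
          · obtain ⟨ee, se⟩ := exactM_sound (n - (n % 4 - 1)) f' (by omega) _ sb.1
            exact ⟨se, sb.2.1, sb.2.2⟩
          · obtain ⟨ee, se⟩ := exactM_sound (n - (n % 4 - 1)) f' (by omega) _ sb.1
            exact ⟨se, sb.2.1, sb.2.2⟩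
          · exact sb
    refine ⟨hev, hun, ?_⟩
    intro f hf m hm
    obtain ⟨f', rfl⟩ : ∃ f', f = f' + 1 := ⟨f - 1, by omega⟩
    rw [bothM, show 2 * n + 5 = (2 * n + 4) + 1 by omega, bothA]
    obtain ⟨ee, se⟩ := hev f' (by omega) m hm
    obtain ⟨eu, su⟩ := hun f' (by omega) _ se
    exact ⟨by simp only [ee, eu], su⟩

-- ===== VERDICT (by name: the statement is the Claim_ definition above) =====
theorem unevens_spec : Claim_equal_unevens := by
  intro n _
  unfold Spec_unevens unevens unevens_alt
  by_cases h : n < 3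
  · simp [h]
  · simp only [h, if_false]
    have hempty : SoundM ⟨PySem.Dict.empty, PySem.Dict.empty, PySem.Dict.empty⟩ := by
      refine ⟨?_, ?_, ?_⟩ <;> intro k v hv <;> simp [PySem.Dict.get?_empty] at hv
    exact ((trioM_sound n.toNat).2.1 (2 * n.toNat + 4) (by omega) _ hempty).1.symm
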